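-- pv_equiv track=rewrite | github.com/urathi05/AlgorithmsRobertSedgewick | idleTime.py | longestIntervals
-- ===== SOURCE A (Python) =====
-- def longestIntervals(jobs):
--     lastFinish = 0
--     currentRunningStart = 0
--     maxIdleTime = 0
--     maxIdleInterval = [0, 0]
--     maxRunningTime = 0
--     maxRunningInterval = [0, 0]
--
--     #Iterate over jobs
--     for i in range(len(jobs)):
--
--         #current job starts after the last one finised - represents idle time
--         if jobs[i][0] > lastFinish:
--
--             #if this idle time is greather than last recorded max idle time
--             #update max idle time
--             #update the new max idle interval
--             if jobs[i][0] - lastFinish > maxIdleTime: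
--                 maxIdleTime = jobs[i][0] - lastFinish
--                 maxIdleInterval[0], maxIdleInterval[1] = lastFinish, jobs[i][0]
--
--             #new current start time for the job if there is idle time
--             currentRunningStart = jobs[i][0]
--
--         #create new current run time when theres no idle time
--         currentRunningTime = jobs[i][1] - currentRunningStart
--
--         #when current running time greater than last recorded max running time
--         #new max run time = current running time
--         #update running interval
--         if currentRunningTime > maxRunningTime:
--             maxRunningTime = currentRunningTime
--             maxRunningInterval[0], maxRunningInterval[1] = currentRunningStart, jobs[i][1]
--
--         #finally check if last recorded finish time is greater or current jobs finish
--         #update last finish accordingly for next loop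
--         lastFinish = max(lastFinish, jobs[i][1])
--
--     return(f"""Max Idle Time is: {maxIdleTime}
-- Max Idle Interval is: {maxIdleInterval}
-- Max Running Time is: {maxRunningTime}
-- Max Running Interval is: {maxRunningInterval}
--     """)
-- ===== SOURCE B (Python) =====
-- def longestIntervals(jobs):
--     # Phase 1: scan once for idle gaps (lastFinish = running max of finishes),
--     # record the widest gap (strict greater, first wins), and split the schedule
--     # into maximal runs, each tagged with its running start.
--     runs = []
--     cur = []
--     curStart = 0
--     lastFinish = 0
--     maxIdleTime = 0
--     maxIdleInterval = [0, 0]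
--     for job in jobs:
--         if job[0] > lastFinish:
--             gap = job[0] - lastFinish
--             if gap > maxIdleTime:
--                 maxIdleTime = gap
--                 maxIdleInterval = [lastFinish, job[0]]
--             runs.append((curStart, cur))
--             curStart = job[0]
--             cur = []
--         cur.append(job)
--         if job[1] > lastFinish:
--             lastFinish = job[1]
--     runs.append((curStart, cur))
--     # Phase 2: per run, running time = finish - run start; strict greater => first maximal wins.
--     maxRunningTime = 0
--     maxRunningInterval = [0, 0]
--     for start, rjobs in runs:
--         for job in rjobs:
--             t = job[1] - start
--             if t > maxRunningTime:
--                 maxRunningTime = t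
--                 maxRunningInterval = [start, job[1]]
--     return (f"""Max Idle Time is: {maxIdleTime}
-- Max Idle Interval is: {maxIdleInterval}
-- Max Running Time is: {maxRunningTime}
-- Max Running Interval is: {maxRunningInterval}
--     """)
-- ===== Notes on version B (the rewrite author's own statement) =====
-- stated objective: alternative
-- what changed: Replaces A's single carried-state scan by a two-phase decomposition: one pass locates idle gaps (recording the widest) and partitions the schedule into maximal runs tagged with their running start, then a per-run pass computes finish - runStart to find the max running interval.
import Mathlib
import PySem

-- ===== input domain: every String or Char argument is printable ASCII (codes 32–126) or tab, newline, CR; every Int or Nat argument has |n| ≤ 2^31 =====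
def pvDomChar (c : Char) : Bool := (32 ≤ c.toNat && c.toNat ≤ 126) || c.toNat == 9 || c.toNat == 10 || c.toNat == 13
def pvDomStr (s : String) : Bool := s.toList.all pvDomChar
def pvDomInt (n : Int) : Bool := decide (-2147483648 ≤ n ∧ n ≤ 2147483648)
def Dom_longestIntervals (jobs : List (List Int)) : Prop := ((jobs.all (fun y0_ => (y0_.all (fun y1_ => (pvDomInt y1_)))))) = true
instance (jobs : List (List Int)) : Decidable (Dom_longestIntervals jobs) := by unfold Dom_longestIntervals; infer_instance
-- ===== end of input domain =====

-- B replaces A's single carried-state scan by gap-segmentation into runs plus a per-run pass (objective: alternative decomposition, same cost).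

-- shared output formatting (both Pythons use the same f-string)
def pvFmt (mi ia ib mr ra rb : Int) : String :=
  "Max Idle Time is: " ++ PySem.Int.toStr mi ++
  "\nMax Idle Interval is: [" ++ PySem.Int.toStr ia ++ ", " ++ PySem.Int.toStr ib ++
  "]\nMax Running Time is: " ++ PySem.Int.toStr mr ++
  "\nMax Running Interval is: [" ++ PySem.Int.toStr ra ++ ", " ++ PySem.Int.toStr rb ++ "]\n    "

-- ===== PORT A =====
-- A's loop body; state = (lastFinish, currentRunningStart, maxIdleTime, maxIdleInterval, (maxRunningTime, maxRunningInterval)).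
-- jobs[i][0] / jobs[i][1] ported as pyGetD (Pre_ guarantees both indices exist; Python raises IndexError otherwise).
def pvStepA (st : Int × Int × Int × (Int × Int) × (Int × (Int × Int))) (job : List Int) :
    Int × Int × Int × (Int × Int) × (Int × (Int × Int)) :=
  let (lastFinish, currentRunningStart, maxIdleTime, maxIdleInterval, run) := st
  let s := PySem.List.pyGetD job 0 0
  let f := PySem.List.pyGetD job 1 0
  let (maxIdleTime, maxIdleInterval, currentRunningStart) :=
    if s > lastFinish then
      if s - lastFinish > maxIdleTime then (s - lastFinish, (lastFinish, s), s)
      else (maxIdleTime, maxIdleInterval, s)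
    else (maxIdleTime, maxIdleInterval, currentRunningStart)
  let currentRunningTime := f - currentRunningStart
  let run := if currentRunningTime > run.1 then (currentRunningTime, (currentRunningStart, f)) else run
  (max lastFinish f, currentRunningStart, maxIdleTime, maxIdleInterval, run)

def longestIntervals (jobs : List (List Int)) : String :=
  let st := jobs.foldl pvStepA (0, 0, 0, (0, 0), (0, (0, 0)))
  pvFmt st.2.2.1 st.2.2.2.1.1 st.2.2.2.1.2 st.2.2.2.2.1 st.2.2.2.2.2.1 st.2.2.2.2.2.2

-- ===== PORT B =====
-- Phase-1 step: state = (runs, cur, curStart, lastFinish, maxIdleTime, maxIdleInterval)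
def pvStepB1 (st : List (Int × List (List Int)) × List (List Int) × Int × Int × Int × (Int × Int))
    (job : List Int) :
    List (Int × List (List Int)) × List (List Int) × Int × Int × Int × (Int × Int) :=
  let (runs, cur, curStart, lastFinish, maxIdleTime, maxIdleInterval) := st
  let s := PySem.List.pyGetD job 0 0
  let f := PySem.List.pyGetD job 1 0
  let (runs, cur, curStart, maxIdleTime, maxIdleInterval) :=
    if s > lastFinish then
      let gap := s - lastFinish
      let (maxIdleTime, maxIdleInterval) :=
        if gap > maxIdleTime then (gap, (lastFinish, s)) else (maxIdleTime, maxIdleInterval)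
      (runs ++ [(curStart, cur)], ([] : List (List Int)), s, maxIdleTime, maxIdleInterval)
    else (runs, cur, curStart, maxIdleTime, maxIdleInterval)
  let cur := cur ++ [job]
  let lastFinish := if f > lastFinish then f else lastFinish
  (runs, cur, curStart, lastFinish, maxIdleTime, maxIdleInterval)

-- Phase-2 inner step: running time of one job within a run starting at `start`
def pvRunStep (start : Int) (acc : Int × (Int × Int)) (job : List Int) : Int × (Int × Int) :=
  let f := PySem.List.pyGetD job 1 0
  let t := f - start
  if t > acc.1 then (t, (start, f)) else acc

-- Phase-2 outer step: fold one run
def pvSegStep (acc : Int × (Int × Int)) (seg : Int × List (List Int)) : Int × (Int × Int) :=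
  seg.2.foldl (pvRunStep seg.1) acc

def longestIntervals_alt (jobs : List (List Int)) : String :=
  let p1 := jobs.foldl pvStepB1 ([], [], 0, 0, 0, (0, 0))
  let runs := p1.1 ++ [(p1.2.2.1, p1.2.1)]
  let r := runs.foldl pvSegStep (0, (0, 0))
  pvFmt p1.2.2.2.2.1 p1.2.2.2.2.2.1 p1.2.2.2.2.2.2 r.1 r.2.1 r.2.2

-- ===== PRECONDITION & SPEC =====
-- Pre_ excludes exactly the schedules containing a job with fewer than 2 entries, on which the Python A raises IndexError.
def Pre_longestIntervals (jobs : List (List Int)) : Prop := ∀ j ∈ jobs, 2 ≤ j.length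
instance (jobs : List (List Int)) : Decidable (Pre_longestIntervals jobs) := by unfold Pre_longestIntervals; infer_instance

def pvWitness_longestIntervals : List (List Int) := [[1, 3], [2, 5], [7, 9]]

def Spec_longestIntervals (jobs : List (List Int)) (out : String) : Prop := out = longestIntervals_alt jobs
instance (jobs : List (List Int)) (out : String) : Decidable (Spec_longestIntervals jobs out) := by unfold Spec_longestIntervals; infer_instance

-- ===== CLAIM (what is proved, stated in full; the proofs are below) =====
def Claim_equal_longestIntervals : Prop := ∀ (jobs : List (List Int)), Dom_longestIntervals jobs → Pre_longestIntervals jobs → Spec_longestIntervals jobs (longestIntervals jobs)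

-- ===== LEMMAS AND PROOFS =====

-- Invariant: A's fold, started with run-component equal to phase-2's value over the runs
-- accumulated so far (closed by the current partial run), tracks B's phase-1 fold.
lemma pv_inv (jobs : List (List Int))
    (runs : List (Int × List (List Int))) (cur : List (List Int)) (cs lf mi : Int) (ii : Int × Int) :
    List.foldl pvStepA (lf, cs, mi, ii, List.foldl pvSegStep (0, (0, 0)) (runs ++ [(cs, cur)])) jobs
    = (let b := List.foldl pvStepB1 (runs, cur, cs, lf, mi, ii) jobs
       (b.2.2.2.1, b.2.2.1, b.2.2.2.2.1, b.2.2.2.2.2,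
        List.foldl pvSegStep (0, (0, 0)) (b.1 ++ [(b.2.2.1, b.2.1)]))) := by
  induction jobs generalizing runs cur cs lf mi ii with
  | nil => simp
  | cons job rest ih =>
    simp only [List.foldl_cons]
    by_cases hgap : PySem.List.pyGetD job 0 0 > lf
    · by_cases hmi : PySem.List.pyGetD job 0 0 - lf > mi
      · rw [show pvStepA (lf, cs, mi, ii, List.foldl pvSegStep (0, (0, 0)) (runs ++ [(cs, cur)])) job
            = (max lf (PySem.List.pyGetD job 1 0), PySem.List.pyGetD job 0 0,
               PySem.List.pyGetD job 0 0 - lf, (lf, PySem.List.pyGetD job 0 0),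
               List.foldl pvSegStep (0, (0, 0))
                 ((runs ++ [(cs, cur)]) ++ [(PySem.List.pyGetD job 0 0, [job])])) from by
              simp [pvStepA, hgap, hmi, pvSegStep, pvRunStep, List.foldl_append],
            show pvStepB1 (runs, cur, cs, lf, mi, ii) job
            = (runs ++ [(cs, cur)], [job], PySem.List.pyGetD job 0 0,
               if PySem.List.pyGetD job 1 0 > lf then PySem.List.pyGetD job 1 0 else lf,
               PySem.List.pyGetD job 0 0 - lf, (lf, PySem.List.pyGetD job 0 0)) from by
              simp [pvStepB1, hgap, hmi]]
        rw [show max lf (PySem.List.pyGetD job 1 0)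
            = if PySem.List.pyGetD job 1 0 > lf then PySem.List.pyGetD job 1 0 else lf from by omega]
        exact ih _ _ _ _ _ _
      · rw [show pvStepA (lf, cs, mi, ii, List.foldl pvSegStep (0, (0, 0)) (runs ++ [(cs, cur)])) job
            = (max lf (PySem.List.pyGetD job 1 0), PySem.List.pyGetD job 0 0, mi, ii,
               List.foldl pvSegStep (0, (0, 0))
                 ((runs ++ [(cs, cur)]) ++ [(PySem.List.pyGetD job 0 0, [job])])) from by
              simp [pvStepA, hgap, hmi, pvSegStep, pvRunStep, List.foldl_append],
            show pvStepB1 (runs, cur, cs, lf, mi, ii) job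
            = (runs ++ [(cs, cur)], [job], PySem.List.pyGetD job 0 0,
               if PySem.List.pyGetD job 1 0 > lf then PySem.List.pyGetD job 1 0 else lf,
               mi, ii) from by simp [pvStepB1, hgap, hmi]]
        rw [show max lf (PySem.List.pyGetD job 1 0)
            = if PySem.List.pyGetD job 1 0 > lf then PySem.List.pyGetD job 1 0 else lf from by omega]
        exact ih _ _ _ _ _ _
    · rw [show pvStepA (lf, cs, mi, ii, List.foldl pvSegStep (0, (0, 0)) (runs ++ [(cs, cur)])) job
          = (max lf (PySem.List.pyGetD job 1 0), cs, mi, ii,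
             List.foldl pvSegStep (0, (0, 0)) (runs ++ [(cs, cur ++ [job])])) from by
            simp [pvStepA, hgap, pvSegStep, pvRunStep, List.foldl_append],
          show pvStepB1 (runs, cur, cs, lf, mi, ii) job
          = (runs, cur ++ [job], cs,
             if PySem.List.pyGetD job 1 0 > lf then PySem.List.pyGetD job 1 0 else lf, mi, ii) from by
            simp [pvStepB1, hgap]]
      rw [show max lf (PySem.List.pyGetD job 1 0)
          = if PySem.List.pyGetD job 1 0 > lf then PySem.List.pyGetD job 1 0 else lf from by omega]
      exact ih _ _ _ _ _ _

-- ===== VERDICT (by name: the statement is the Claim_ definition above) =====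
theorem longestIntervals_spec : Claim_equal_longestIntervals := by
  intro jobs _ _
  unfold Spec_longestIntervals longestIntervals longestIntervals_alt
  have h := pv_inv jobs [] [] 0 0 0 (0, 0)
  simp only [List.nil_append] at h
  rw [show List.foldl pvSegStep (0, (0, 0)) [((0:Int), ([] : List (List Int)))] = (0, (0, 0)) from by
    simp [pvSegStep]] at h
  rw [h]
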